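-- pv_equiv track=rewrite | github.com/befovis/algorithms_itmo | lab3/task3/scr/scarecrow.py | scarecrow_sort
-- ===== SOURCE A (Python) =====
-- def scarecrow_sort(n, k, sizes):
--     groups = [[] for _ in range(k)]
--     for i in range(n):
--         groups[i % k].append(sizes[i])
--     for group in groups:
--         group.sort(reverse=True)
--
--     sorted_dolls = [groups[i % k][i // k] for i in range(n)]
--     return sorted_dolls == sorted(sorted_dolls, reverse=True)
-- ===== SOURCE B (Python) =====
-- def scarecrow_sort(n, k, sizes):
--     # A rearrangement that reads column (i % k) at rank (i // k) is globally
--     # descending iff, for every residue class j, the multiset of values at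
--     # positions j, j+k, ... equals the multiset found at those positions in
--     # the descending sort of the whole prefix.  So: one global sort, then a
--     # counting (hash-map) comparison per residue class -- no per-column sorts,
--     # no rearranged list is ever built.
--     if n <= 0:
--         return True
--     s = sorted(sizes[:n], reverse=True)
--     for j in range(k):
--         diff = {}
--         for i in range(j, n, k):
--             diff[sizes[i]] = diff.get(sizes[i], 0) + 1
--             diff[s[i]] = diff.get(s[i], 0) - 1
--         if any(v != 0 for v in diff.values()):
--             return False
--     return True
-- ===== Notes on version B (the rewrite author's own statement) =====
-- stated objective: alternative
-- what changed: B never builds the rearranged list and sorts no column: it sorts the whole prefix once descending and, for each residue class mod k, compares the multiset of original values with the multiset at those positions of the global sort via a single hash-map count pass with early exit.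
import Mathlib
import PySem

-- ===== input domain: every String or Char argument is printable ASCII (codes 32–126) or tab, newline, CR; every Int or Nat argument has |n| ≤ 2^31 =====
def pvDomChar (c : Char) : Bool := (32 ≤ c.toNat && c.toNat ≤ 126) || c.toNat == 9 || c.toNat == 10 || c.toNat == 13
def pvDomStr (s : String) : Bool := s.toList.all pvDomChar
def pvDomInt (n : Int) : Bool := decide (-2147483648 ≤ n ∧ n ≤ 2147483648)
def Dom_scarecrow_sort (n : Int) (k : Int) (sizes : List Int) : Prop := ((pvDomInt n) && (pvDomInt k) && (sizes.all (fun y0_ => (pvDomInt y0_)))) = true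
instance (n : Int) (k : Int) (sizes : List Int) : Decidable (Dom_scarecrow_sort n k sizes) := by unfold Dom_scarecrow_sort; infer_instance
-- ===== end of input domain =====

-- B (alternative): instead of building the interleaved rearrangement and sorting it again,
-- B sorts the prefix once descending and compares, per residue class mod k, the multiset of
-- original values against the multiset at those positions of the global sort by hash-map counting.

-- ===== PORT A =====
def scarecrow_sort (n : Int) (k : Int) (sizes : List Int) : Bool :=
  -- groups = [[] for _ in range(k)]
  let groups0 : List (List Int) := (PySem.List.pyRange 0 k 1).map (fun _ => [])
  -- for i in range(n): groups[i % k].append(sizes[i])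
  let groups1 := (PySem.List.pyRange 0 n 1).foldl (fun gs i =>
      PySem.List.pySetD gs (PySem.Int.mod i k)
        ((PySem.List.pyGetD gs (PySem.Int.mod i k) []) ++ [PySem.List.pyGetD sizes i 0])) groups0
  -- for group in groups: group.sort(reverse=True)
  let groups := groups1.map (fun g => PySem.List.sorted g (fun x => x) true)
  -- sorted_dolls = [groups[i % k][i // k] for i in range(n)]
  let dolls := (PySem.List.pyRange 0 n 1).map (fun i =>
      PySem.List.pyGetD (PySem.List.pyGetD groups (PySem.Int.mod i k) []) (PySem.Int.floordiv i k) 0)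
  -- return sorted_dolls == sorted(sorted_dolls, reverse=True)
  decide (dolls = PySem.List.sorted dolls (fun x => x) true)

-- ===== PORT B =====
def scarecrow_sort_alt (n : Int) (k : Int) (sizes : List Int) : Bool :=
  if n ≤ 0 then true
  else
    -- s = sorted(sizes[:n], reverse=True)
    let s := PySem.List.sorted (PySem.List.slice sizes none (some n)) (fun x => x) true
    -- for j in range(k): build the count-difference dict, fail if any count differs
    (PySem.List.pyRange 0 k 1).all (fun j =>
      let diff := (PySem.List.pyRange j n k).foldl (fun d i =>
        (d.modify (PySem.List.pyGetD sizes i 0) 0 (· + 1)).modify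
          (PySem.List.pyGetD s i 0) 0 (· - 1)) (PySem.Dict.empty : PySem.Dict Int Int)
      !(diff.values.any (fun v => v != 0)))

-- ===== PRECONDITION & SPEC =====
-- Pre_ excludes exactly the inputs where A raises: for 0 < n Python hits groups[i % k]
-- (ZeroDivisionError/IndexError unless 0 < k) and sizes[i] (IndexError unless n ≤ len(sizes)).
def Pre_scarecrow_sort (n : Int) (k : Int) (sizes : List Int) : Prop :=
  0 < n → (0 < k ∧ n ≤ (sizes.length : Int))
instance (n : Int) (k : Int) (sizes : List Int) : Decidable (Pre_scarecrow_sort n k sizes) := by unfold Pre_scarecrow_sort; infer_instance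
def pvWitness_scarecrow_sort : Int × Int × List Int := (4, 2, [5, 3, 4, 2])

def Spec_scarecrow_sort (n : Int) (k : Int) (sizes : List Int) (out : Bool) : Prop := out = scarecrow_sort_alt n k sizes
instance (n : Int) (k : Int) (sizes : List Int) (out : Bool) : Decidable (Spec_scarecrow_sort n k sizes out) := by unfold Spec_scarecrow_sort; infer_instance

-- ===== CLAIM (what is proved, stated in full; the proofs are below) =====
def Claim_equal_scarecrow_sort : Prop := ∀ (n : Int) (k : Int) (sizes : List Int), Dom_scarecrow_sort n k sizes → Pre_scarecrow_sort n k sizes → Spec_scarecrow_sort n k sizes (scarecrow_sort n k sizes)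
-- ===== LEMMAS AND PROOFS =====

-- the values of the prefix sizes[:n] found at positions j, j+k, j+2k, …
def pvU (sizes : List Int) (N K : Nat) (j : Int) : List Int :=
  (PySem.List.pyRange j (N:Int) (K:Int)).map (fun i => PySem.List.pyGetD sizes i 0)

-- the descending sort of the prefix
def pvS (sizes : List Int) (N : Nat) : List Int :=
  PySem.List.sorted (sizes.take N) (fun x => x) true

-- the values of the global descending sort found at positions j, j+k, j+2k, …
def pvStrS (sizes : List Int) (N K : Nat) (j : Int) : List Int :=
  (PySem.List.pyRange j (N:Int) (K:Int)).map (fun i => PySem.List.pyGetD (pvS sizes N) i 0)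

-- A's element at rearranged position i
def pvF (sizes : List Int) (N K : Nat) (i : Int) : Int :=
  PySem.List.pyGetD
    (PySem.List.pyGetD ((PySem.List.pyRange 0 (K:Int) 1).map
      (fun j => PySem.List.sorted (pvU sizes N K j) (fun x => x) true)) (PySem.Int.mod i (K:Int)) [])
    (PySem.Int.floordiv i (K:Int)) 0

def pvDolls (sizes : List Int) (N K : Nat) : List Int :=
  (PySem.List.pyRange 0 (N:Int) 1).map (pvF sizes N K)

-- step lemma for a positive-stride range
lemma pyRange_step_succ (k j m : Int) (hk : 0 < k) (hj : 0 ≤ j) (hjk : j < k) (hm : 0 ≤ m) :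
    PySem.List.pyRange j (m+1) k
      = PySem.List.pyRange j m k ++ (if PySem.Int.mod m k = j then [m] else []) := by
  rw [PySem.List.pyRange_of_pos _ _ hk, PySem.List.pyRange_of_pos _ _ hk,
      PySem.Int.mod_eq_emod_of_pos hk]
  set q := (m - j) / k with hq
  set r := (m - j) % k with hrdef
  have hdecomp : k * q + r = m - j := (Int.mul_ediv_add_emod (m - j) k)
  have hr0 : 0 ≤ r := Int.emod_nonneg _ (ne_of_gt hk)
  have hrk : r < k := Int.emod_lt_of_pos _ hk
  have hcond : m % k = j ↔ r = 0 := by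
    constructor
    · intro h
      have : (m - j) % k = (m % k - j % k) % k := by rw [Int.sub_emod]
      rw [h, Int.emod_eq_of_lt hj hjk, sub_self, Int.zero_emod] at this
      omega
    · intro h
      have hmj : m = j + k * q := by omega
      have : m % k = (j + k * q) % k := by rw [hmj]
      rw [Int.add_mul_emod_self_left] at this
      rw [this, Int.emod_eq_of_lt hj hjk]
  by_cases hc : m % k = j
  · have hr : r = 0 := hcond.mp hc
    have hjm : j ≤ m := by
      have h1 := Int.mul_ediv_add_emod m k
      have h2 : 0 ≤ m / k := Int.ediv_nonneg hm (le_of_lt hk)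
      have h3 : 0 ≤ k * (m / k) := mul_nonneg (le_of_lt hk) h2
      have h4 : m % k ≤ m := by omega
      omega
    have hq0 : 0 ≤ q := Int.ediv_nonneg (by omega) (le_of_lt hk)
    rw [if_pos hc, if_pos (by omega : j < m + 1)]
    have hc2 : (m + 1 - j + k - 1) / k = q + 1 := by
      rw [show m + 1 - j + k - 1 = 0 + (q+1) * k by nlinarith,
          Int.add_mul_ediv_right _ _ (ne_of_gt hk), Int.zero_ediv, zero_add]
    have hc1 : (if j < m then ((m - j + k - 1) / k).toNat else 0) = q.toNat := by
      by_cases hjm' : j < m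
      · rw [if_pos hjm']
        congr 1
        rw [show m - j + k - 1 = (k - 1) + q * k by nlinarith,
            Int.add_mul_ediv_right _ _ (ne_of_gt hk),
            Int.ediv_eq_zero_of_lt (by omega) (by omega), zero_add]
      · have hje : j = m := by omega
        have : k * q = 0 := by omega
        have hq00 : q = 0 := by
          rcases mul_eq_zero.mp this with h | h
          · omega
          · exact h
        simp [hje, hq00]
    rw [hc2, hc1, show (q+1).toNat = q.toNat + 1 by omega, List.range_succ,
        List.map_append, List.map_singleton]
    congr 2
    have : (q.toNat : Int) = q := Int.toNat_of_nonneg hq0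
    nlinarith [this]
  · have hr : r ≠ 0 := fun h => hc (hcond.mpr h)
    rw [if_neg hc, List.append_nil]
    by_cases hjm' : j < m
    · have hq0 : 0 ≤ q := Int.ediv_nonneg (by omega) (le_of_lt hk)
      rw [if_pos (by omega : j < m + 1), if_pos hjm']
      congr 2
      have e1 : (m - j + k - 1) / k = q + 1 := by
        rw [show m - j + k - 1 = (r + k - 1) + q * k by nlinarith,
            Int.add_mul_ediv_right _ _ (ne_of_gt hk),
            show (r + k - 1) / k = 1 by
              rw [show r + k - 1 = (r - 1) + 1 * k by ring,
                  Int.add_mul_ediv_right _ _ (ne_of_gt hk),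
                  Int.ediv_eq_zero_of_lt (by omega) (by omega)]
              ring]
        ring
      have e2 : (m + 1 - j + k - 1) / k = q + 1 := by
        rw [show m + 1 - j + k - 1 = r + (q + 1) * k by nlinarith,
            Int.add_mul_ediv_right _ _ (ne_of_gt hk),
            Int.ediv_eq_zero_of_lt (by omega) (by omega), zero_add]
      rw [e1, e2]
    · have hje : ¬ j < m + 1 := by
        by_contra hlt
        have : j = m := by omega
        subst this
        simp at hrdef
        omega
      rw [if_neg hje, if_neg hjm']

-- the bucket loop of A builds exactly the residue-class columns
lemma bucket (sizes : List Int) (K : Nat) (m : Nat) (hk : 0 < K) :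
    (PySem.List.pyRange 0 (m:Int) 1).foldl (fun gs i =>
        PySem.List.pySetD gs (PySem.Int.mod i (K:Int))
          ((PySem.List.pyGetD gs (PySem.Int.mod i (K:Int)) []) ++ [PySem.List.pyGetD sizes i 0]))
      ((PySem.List.pyRange 0 (K:Int) 1).map (fun _ => []))
    = (PySem.List.pyRange 0 (K:Int) 1).map (fun j =>
        (PySem.List.pyRange j (m:Int) (K:Int)).map (fun i => PySem.List.pyGetD sizes i 0)) := by
  induction m with
  | zero =>
    rw [show ((0:Nat):Int) = 0 by rfl, PySem.List.pyRange_one_eq_nil le_rfl, List.foldl_nil]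
    apply List.map_congr_left
    intro j hj
    have hj0 : 0 ≤ j := ((PySem.List.mem_pyRange_one).mp hj).1
    rw [PySem.List.pyRange_of_pos _ _ (by exact_mod_cast hk), if_neg (by omega)]
    simp
  | succ m ih =>
    rw [show ((m+1:Nat):Int) = (m:Int) + 1 by push_cast; ring,
        PySem.List.pyRange_one_succ_right (by positivity), List.foldl_append, ih,
        List.foldl_cons, List.foldl_nil]
    have hkk : (0:Int) < (K:Int) := by exact_mod_cast hk
    rw [PySem.Int.mod_natCast m K, PySem.List.pySetD_natCast]
    apply List.ext_getElem
    · simp [PySem.List.length_pyRange_one]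
    · intro t ht1 ht2
      have htK : t < K := by
        simpa [PySem.List.length_pyRange_one] using ht2
      have hmodK : m % K < K := Nat.mod_lt _ hk
      have hstep := pyRange_step_succ (K:Int) (t:Int) (m:Int) hkk (by positivity)
        (by exact_mod_cast htK) (by positivity)
      simp only [List.getElem_set, List.getElem_map,
        PySem.List.pyGetD_map_pyRange _ K (m % K) _ hmodK,
        PySem.List.getElem_pyRange_one, zero_add, hstep,
        PySem.Int.mod_natCast m K, List.map_append]
      by_cases hEq : m % K = t
      · rw [if_pos hEq, if_pos (by exact_mod_cast hEq)]
        simp [hEq]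
      · rw [if_neg hEq, if_neg (by exact_mod_cast hEq), List.map_nil, List.append_nil]

-- how many indices j, j+K, … lie below N
lemma cnt_iff (NI KI j : Int) (t : Nat) (hK : 0 < KI) (hj : 0 ≤ j) :
    (t < (if j < NI then ((NI - j + KI - 1) / KI).toNat else 0)) ↔ j + KI * t < NI := by
  by_cases hjN : j < NI
  · rw [if_pos hjN]
    set q := (NI - j + KI - 1) / KI with hq
    have hde := Int.mul_ediv_add_emod (NI - j + KI - 1) KI
    have h0 : 0 ≤ (NI - j + KI - 1) % KI := Int.emod_nonneg _ (ne_of_gt hK)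
    have h1 : (NI - j + KI - 1) % KI < KI := Int.emod_lt_of_pos _ hK
    have hq0 : 0 ≤ q := Int.ediv_nonneg (by omega) (le_of_lt hK)
    constructor
    · intro ht
      have ht' : (t:Int) + 1 ≤ q := by omega
      have h2 : KI * ((t:Int) + 1) ≤ KI * q := mul_le_mul_of_nonneg_left ht' (le_of_lt hK)
      have e : KI * ((t:Int) + 1) = KI * t + KI := by ring
      linarith
    · intro h
      have h3 : KI * (t:Int) < KI * q := by linarith
      have ht : (t:Int) < q := lt_of_mul_lt_mul_left h3 (le_of_lt hK)
      omega
  · rw [if_neg hjN]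
    simp only [Nat.not_lt_zero, false_iff, not_lt]
    have h4 : 0 ≤ KI * (t:Int) := mul_nonneg (le_of_lt hK) (by positivity)
    linarith

lemma map_range_getD {α : Type} (l : List α) (d : α) :
    (List.range l.length).map (fun t => l.getD t d) = l := by
  apply List.ext_getElem
  · simp
  · intro i h1 h2
    simp only [List.getElem_map, List.getElem_range]
    rw [List.getD_eq_getElem l d h2]

-- reading a map over pyRange 0 N 1 inside [0, N) is just applying the function
lemma getD_map_pyRange_int (f : Int → Int) (N : Nat) (i : Int) (h0 : 0 ≤ i) (hN : i < (N:Int)) :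
    PySem.List.pyGetD ((PySem.List.pyRange 0 (N:Int) 1).map f) i 0 = f i := by
  obtain ⟨m, rfl⟩ : ∃ m : Nat, i = (m:Int) := ⟨i.toNat, by omega⟩
  exact PySem.List.pyGetD_map_pyRange f N m 0 (by exact_mod_cast hN)

-- the stride j of A's rearrangement is exactly the descending sort of column j
lemma strideC (sizes : List Int) (N K jn : Nat) (hK : 0 < K) (hj : jn < K) :
    (PySem.List.pyRange (jn:Int) (N:Int) (K:Int)).map (pvF sizes N K)
      = PySem.List.sorted (pvU sizes N K (jn:Int)) (fun x => x) true := by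
  have hKI : (0:Int) < (K:Int) := by exact_mod_cast hK
  conv_lhs => rw [PySem.List.pyRange_of_pos _ _ hKI]
  rw [List.map_map]
  have hc : (if (jn:Int) < (N:Int) then (((N:Int) - jn + K - 1) / K).toNat else 0)
      = (PySem.List.sorted (pvU sizes N K (jn:Int)) (fun x => x) true).length := by
    rw [PySem.List.length_sorted]
    unfold pvU
    rw [List.length_map, PySem.List.pyRange_of_pos _ _ hKI, List.length_map, List.length_range]
  have hcongr : ∀ t ∈ List.range (if (jn:Int) < (N:Int) then (((N:Int) - jn + K - 1) / K).toNat else 0),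
      ((pvF sizes N K) ∘ (fun t : Nat => (jn:Int) + K * t)) t
        = (PySem.List.sorted (pvU sizes N K (jn:Int)) (fun x => x) true).getD t 0 := by
    intro t ht
    have htc := List.mem_range.mp ht
    have hiN : (jn:Int) + K * t < N := (cnt_iff (N:Int) (K:Int) (jn:Int) t hKI (by positivity)).mp htc
    have hmod : PySem.Int.mod ((jn:Int) + K * t) K = (jn:Int) := by
      rw [PySem.Int.mod_eq_emod_of_pos hKI, Int.add_mul_emod_self_left,
        Int.emod_eq_of_lt (by positivity) (by exact_mod_cast hj)]
    have hdiv : PySem.Int.floordiv ((jn:Int) + K * t) K = (t:Int) := by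
      rw [PySem.Int.floordiv_eq_iff_of_pos hKI]
      have hj0 : (0:Int) ≤ (jn:Int) := by positivity
      have hjK : (jn:Int) < K := by exact_mod_cast hj
      have e1 : (t:Int) * K = K * t := mul_comm _ _
      have e2 : ((t:Int) + 1) * K = K * t + K := by ring
      constructor
      · linarith
      · linarith
    simp only [Function.comp_def]
    rw [pvF, hmod, hdiv,
      PySem.List.pyGetD_map_pyRange (fun j => PySem.List.sorted (pvU sizes N K j) (fun x => x) true) K jn [] hj,
      PySem.List.pyGetD_natCast]
  rw [List.map_congr_left hcongr, hc, map_range_getD]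

-- the index strides partition range(N)
lemma perm_ranges (N K : Nat) (hK : 0 < K) :
    ((PySem.List.pyRange 0 (K:Int) 1).flatMap (fun j => PySem.List.pyRange j (N:Int) (K:Int))).Perm
      (PySem.List.pyRange 0 (N:Int) 1) := by
  have hKI : (0:Int) < (K:Int) := by exact_mod_cast hK
  have hnd : ((PySem.List.pyRange 0 (K:Int) 1).flatMap (fun j => PySem.List.pyRange j (N:Int) (K:Int))).Nodup := by
    rw [List.nodup_flatMap]
    constructor
    · intro j hj
      rw [PySem.List.pyRange_of_pos _ _ hKI]
      refine List.Nodup.map ?_ List.nodup_range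
      intro a b hab
      have h2 : (K:Int) * a = K * b := by dsimp only at hab; linarith
      have h3 : (a:Int) = b := mul_left_cancel₀ (ne_of_gt hKI) h2
      exact_mod_cast h3
    · refine (PySem.List.pairwise_lt_pyRange_one (a := 0) (b := (K:Int))).imp_of_mem ?_
      intro j1 j2 hm1 hm2 hlt x hx1 hx2
      obtain ⟨hj10, hj1K⟩ := PySem.List.mem_pyRange_one.mp hm1
      obtain ⟨hj20, hj2K⟩ := PySem.List.mem_pyRange_one.mp hm2
      rw [PySem.List.mem_pyRange_iff_of_pos hKI] at hx1 hx2
      have hdvd : (K:Int) ∣ (j2 - j1) := by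
        have := dvd_sub hx1.2.2 hx2.2.2
        simpa using this
      have hle := Int.le_of_dvd (by omega) hdvd
      omega
  rw [List.perm_ext_iff_of_nodup hnd (PySem.List.nodup_pyRange_one 0 ((N:Int)))]
  intro x
  simp only [List.mem_flatMap, PySem.List.mem_pyRange_one, PySem.List.mem_pyRange_iff_of_pos hKI]
  constructor
  · rintro ⟨j, ⟨hj0, hjK⟩, hjx, hxN, -⟩
    exact ⟨by omega, hxN⟩
  · rintro ⟨hx0, hxN⟩
    refine ⟨x % K, ⟨Int.emod_nonneg _ (ne_of_gt hKI), Int.emod_lt_of_pos _ hKI⟩, ?_, hxN, ?_⟩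
    · by_cases hxK : x < (K:Int)
      · rw [Int.emod_eq_of_lt hx0 hxK]
      · have := Int.emod_lt_of_pos x hKI
        omega
    · exact ⟨x / K, by have := Int.mul_ediv_add_emod x (K:Int); linarith⟩

lemma map_getD_pyRange_take (sizes : List Int) (N : Nat) (h : N ≤ sizes.length) :
    (PySem.List.pyRange 0 (N:Int) 1).map (fun i => PySem.List.pyGetD sizes i 0) = sizes.take N := by
  rw [PySem.List.pyRange_zero_nat, List.map_map]
  apply List.ext_getElem
  · simp
    omega
  · intro i h1 h2
    simp only [List.getElem_map, List.getElem_range, Function.comp_def, List.getElem_take]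
    rw [PySem.List.pyGetD_natCast]
    have hi : i < sizes.length := by
      simp only [List.length_take] at h2
      omega
    rw [List.getD_eq_getElem sizes 0 hi]

-- two descending lists with the same multiset are equal
lemma descEq {l1 l2 : List Int} (hp : l1.Perm l2)
    (h1 : l1.Pairwise (fun a b => b ≤ a)) (h2 : l2.Pairwise (fun a b => b ≤ a)) : l1 = l2 := by
  refine PySem.List.eq_of_perm_of_pairwise_le_of_injective (fun x => -x) neg_injective hp ?_ ?_
  · exact h1.imp (fun h => by dsimp only; omega)
  · exact h2.imp (fun h => by dsimp only; omega)

lemma dolls_perm (sizes : List Int) (N K : Nat) (hK : 0 < K) (hlen : N ≤ sizes.length) :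
    (pvDolls sizes N K).Perm (sizes.take N) := by
  have h1 : (pvDolls sizes N K).Perm
      (((PySem.List.pyRange 0 (K:Int) 1).flatMap (fun j => PySem.List.pyRange j (N:Int) (K:Int))).map (pvF sizes N K)) :=
    ((perm_ranges N K hK).map (pvF sizes N K)).symm
  rw [List.map_flatMap] at h1
  have h2 : ((PySem.List.pyRange 0 (K:Int) 1).flatMap (fun j => (PySem.List.pyRange j (N:Int) (K:Int)).map (pvF sizes N K))).Perm
      ((PySem.List.pyRange 0 (K:Int) 1).flatMap (fun j => pvU sizes N K j)) := by
    apply List.Perm.flatMap_left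
    intro j hj
    obtain ⟨hj0, hjK⟩ := PySem.List.mem_pyRange_one.mp hj
    obtain ⟨jn, rfl⟩ : ∃ jn : Nat, j = (jn:Int) := ⟨j.toNat, by omega⟩
    rw [strideC sizes N K jn hK (by exact_mod_cast hjK)]
    exact PySem.List.sorted_perm _ _ _
  have h3 : ((PySem.List.pyRange 0 (K:Int) 1).flatMap (fun j => pvU sizes N K j))
      = ((PySem.List.pyRange 0 (K:Int) 1).flatMap (fun j => PySem.List.pyRange j (N:Int) (K:Int))).map (fun i => PySem.List.pyGetD sizes i 0) := by
    rw [List.map_flatMap]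
    rfl
  have h4 : (((PySem.List.pyRange 0 (K:Int) 1).flatMap (fun j => PySem.List.pyRange j (N:Int) (K:Int))).map (fun i => PySem.List.pyGetD sizes i 0)).Perm
      (sizes.take N) := by
    rw [← map_getD_pyRange_take sizes N hlen]
    exact (perm_ranges N K hK).map _
  exact ((h1.trans h2).trans (h3 ▸ List.Perm.refl _)).trans h4

lemma strS_pairwise (sizes : List Int) (N K : Nat) (j : Int) (hK : 0 < K) (hj : 0 ≤ j)
    (hlen : N ≤ sizes.length) :
    (pvStrS sizes N K j).Pairwise (fun a b => b ≤ a) := by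
  have hKI : (0:Int) < (K:Int) := by exact_mod_cast hK
  have hSlen : (pvS sizes N).length = N := by
    unfold pvS
    rw [PySem.List.length_sorted, List.length_take]
    omega
  have hS : (pvS sizes N).Pairwise (fun a b => b ≤ a) := PySem.List.sorted_pairwise_rev _ _
  rw [List.pairwise_iff_getElem] at hS
  unfold pvStrS
  rw [List.pairwise_map]
  have hpw : (PySem.List.pyRange j (N:Int) (K:Int)).Pairwise (· < ·) := by
    rw [PySem.List.pyRange_of_pos _ _ hKI]
    rw [List.pairwise_map]
    refine List.pairwise_lt_range.imp ?_
    intro a b hab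
    show j + (K:Int) * a < j + (K:Int) * b
    have : (K:Int) * a < K * b := by
      apply mul_lt_mul_of_pos_left _ hKI
      exact_mod_cast hab
    linarith
  refine hpw.imp_of_mem ?_
  intro i1 i2 hm1 hm2 hlt
  rw [PySem.List.mem_pyRange_iff_of_pos hKI] at hm1 hm2
  have h10 : 0 ≤ i1 := le_trans hj hm1.1
  have h20 : 0 ≤ i2 := le_trans hj hm2.1
  rw [PySem.List.pyGetD_eq_getElem _ _ h10 (by rw [hSlen]; exact_mod_cast hm1.2.1),
      PySem.List.pyGetD_eq_getElem _ _ h20 (by rw [hSlen]; exact_mod_cast hm2.2.1)]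
  exact hS i1.toNat i2.toNat (by rw [hSlen]; omega) (by rw [hSlen]; omega) (by omega)

-- count-difference dict: lookup
lemma diff_getD (p q : Int → Int) (l : List Int) (d : PySem.Dict Int Int) (v : Int) :
    (l.foldl (fun d i => ((d.modify (p i) 0 (· + 1)).modify (q i) 0 (· - 1))) d).getD v 0
      = d.getD v 0 + ((l.map p).count v : Int) - ((l.map q).count v : Int) := by
  induction l generalizing d with
  | nil => simp
  | cons a l ih =>
    simp only [List.foldl_cons, List.map_cons, ih, PySem.Dict.getD_modify, List.count_cons,
      beq_iff_eq]
    split_ifs <;> subst_vars <;> simp_all <;> push_cast <;> omega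

-- count-difference dict: keys
lemma diff_keys (p q : Int → Int) (l : List Int) (d : PySem.Dict Int Int) (x : Int) :
    x ∈ (l.foldl (fun d i => ((d.modify (p i) 0 (· + 1)).modify (q i) 0 (· - 1))) d).keys
      ↔ x ∈ d.keys ∨ x ∈ l.map p ∨ x ∈ l.map q := by
  induction l generalizing d with
  | nil => simp
  | cons a l ih =>
    simp only [List.foldl_cons, ih, List.map_cons, List.mem_cons]
    have hm : ∀ (d : PySem.Dict Int Int) (k : Int) (f : Int → Int),
        x ∈ (d.modify k 0 f).keys ↔ x = k ∨ x ∈ d.keys := by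
      intro d k f
      rw [PySem.Dict.keys_modify]
      exact PySem.Dict.mem_keys_insert _ _ _ _
    rw [hm, hm]
    tauto

lemma diff_nodup (p q : Int → Int) (l : List Int) (d : PySem.Dict Int Int) (hd : d.keys.Nodup) :
    (l.foldl (fun d i => ((d.modify (p i) 0 (· + 1)).modify (q i) 0 (· - 1))) d).keys.Nodup := by
  induction l generalizing d with
  | nil => exact hd
  | cons a l ih =>
    simp only [List.foldl_cons]
    apply ih
    have hstep : ∀ (d : PySem.Dict Int Int) (k : Int) (f : Int → Int),
        d.keys.Nodup → (d.modify k 0 f).keys.Nodup := by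
      intro d k f h
      rw [PySem.Dict.keys_modify]
      have := PySem.Dict.nodup_keys_insert d k (f (d.getD k 0)) h
      exact this
    exact hstep _ _ _ (hstep _ _ _ hd)

-- B's per-residue check is multiset equality of the two strides
lemma body_iff (p q : Int → Int) (l : List Int) :
    (!( (l.foldl (fun d i => ((d.modify (p i) 0 (· + 1)).modify (q i) 0 (· - 1)))
          (PySem.Dict.empty : PySem.Dict Int Int)).values.any (fun v => v != 0))) = true
      ↔ (l.map p).Perm (l.map q) := by
  have hnd := diff_nodup p q l PySem.Dict.empty PySem.Dict.nodup_keys_empty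
  rw [Bool.not_eq_true']
  simp only [PySem.Dict.values_eq_map_keys _ hnd 0]
  rw [List.any_eq_false, List.perm_iff_count]
  constructor
  · intro h v
    by_cases hv : v ∈ (l.foldl (fun d i => ((d.modify (p i) 0 (· + 1)).modify (q i) 0 (· - 1)))
        (PySem.Dict.empty : PySem.Dict Int Int)).keys
    · have h0 := h _ (List.mem_map.mpr ⟨v, hv, rfl⟩)
      have hg := diff_getD p q l PySem.Dict.empty v
      rw [PySem.Dict.getD_empty] at hg
      simp only [bne_iff_ne, ne_eq, not_not] at h0
      omega
    · have hk := diff_keys p q l PySem.Dict.empty v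
      rw [PySem.Dict.keys_empty] at hk
      simp only [List.not_mem_nil, false_or] at hk
      have hmem : v ∉ l.map p ∧ v ∉ l.map q := by
        constructor <;> intro hc <;> exact hv (hk.mpr (by tauto))
      rw [List.count_eq_zero_of_not_mem hmem.1, List.count_eq_zero_of_not_mem hmem.2]
  · intro h b hb
    obtain ⟨v, hv, rfl⟩ := List.mem_map.mp hb
    have hg := diff_getD p q l PySem.Dict.empty v
    rw [PySem.Dict.getD_empty] at hg
    have hc := h v
    simp only [bne_iff_ne, ne_eq, not_not]
    omega

lemma stride_len_iff (N K jn t : Nat) (hK : 0 < K) :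
    t < (PySem.List.pyRange (jn:Int) (N:Int) (K:Int)).length ↔ jn + K * t < N := by
  have hKI : (0:Int) < (K:Int) := by exact_mod_cast hK
  rw [PySem.List.pyRange_of_pos _ _ hKI, List.length_map, List.length_range,
    cnt_iff (N:Int) (K:Int) (jn:Int) t hKI (by positivity)]
  constructor <;> intro h <;> exact_mod_cast h

lemma stride_getElem (N K jn t : Nat) (hK : 0 < K)
    (hlt : t < (PySem.List.pyRange (jn:Int) (N:Int) (K:Int)).length) :
    (PySem.List.pyRange (jn:Int) (N:Int) (K:Int))[t] = ((jn + K * t : Nat) : Int) := by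
  have hKI : (0:Int) < (K:Int) := by exact_mod_cast hK
  rw [List.getElem_of_eq (PySem.List.pyRange_of_pos (jn:Int) (N:Int) hKI) hlt]
  simp only [List.getElem_map, List.getElem_range]
  push_cast
  ring

-- the heart: A's test is equivalent to per-residue multiset equality
lemma main_iff (sizes : List Int) (N K : Nat) (hK : 0 < K) (hlen : N ≤ sizes.length) :
    (pvDolls sizes N K = PySem.List.sorted (pvDolls sizes N K) (fun x => x) true)
      ↔ ∀ j ∈ PySem.List.pyRange 0 (K:Int) 1, (pvU sizes N K j).Perm (pvStrS sizes N K j) := by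
  have hKI : (0:Int) < (K:Int) := by exact_mod_cast hK
  have hSlen : (pvS sizes N).length = N := by
    unfold pvS
    rw [PySem.List.length_sorted, List.length_take]
    omega
  have hDlen : (pvDolls sizes N K).length = N := by
    unfold pvDolls
    rw [List.length_map, PySem.List.length_pyRange_one]
    omega
  have hstrS_of_dollsS : pvDolls sizes N K = pvS sizes N →
      ∀ jn : Nat, jn < K →
        pvStrS sizes N K (jn:Int) = PySem.List.sorted (pvU sizes N K (jn:Int)) (fun x => x) true := by
    intro hDS jn hjn
    unfold pvStrS
    rw [← hDS, ← strideC sizes N K jn hK hjn]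
    apply List.map_congr_left
    intro i hi
    rw [PySem.List.mem_pyRange_iff_of_pos hKI] at hi
    have h0i : 0 ≤ i := le_trans (by positivity) hi.1
    exact getD_map_pyRange_int (pvF sizes N K) N i h0i hi.2.1
  constructor
  · intro h
    have hdesc : (pvDolls sizes N K).Pairwise (fun a b => b ≤ a) := by
      rw [h]
      exact PySem.List.sorted_pairwise_rev _ _
    have hDS : pvDolls sizes N K = pvS sizes N :=
      descEq ((dolls_perm sizes N K hK hlen).trans (PySem.List.sorted_perm _ _ _).symm) hdesc
        (PySem.List.sorted_pairwise_rev _ _)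
    intro j hj
    obtain ⟨hj0, hjK⟩ := PySem.List.mem_pyRange_one.mp hj
    obtain ⟨jn, rfl⟩ : ∃ jn : Nat, j = (jn:Int) := ⟨j.toNat, by omega⟩
    rw [hstrS_of_dollsS hDS jn (by exact_mod_cast hjK)]
    exact (PySem.List.sorted_perm _ _ _).symm
  · intro h
    have hstr : ∀ jn : Nat, jn < K →
        (PySem.List.pyRange (jn:Int) (N:Int) (K:Int)).map (pvF sizes N K) = pvStrS sizes N K (jn:Int) := by
      intro jn hjn
      rw [strideC sizes N K jn hK hjn]
      have hperm : (pvU sizes N K (jn:Int)).Perm (pvStrS sizes N K (jn:Int)) :=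
        h (jn:Int) (PySem.List.mem_pyRange_one.mpr ⟨by positivity, by exact_mod_cast hjn⟩)
      exact descEq ((PySem.List.sorted_perm _ _ _).trans hperm)
        (PySem.List.sorted_pairwise_rev _ _)
        (strS_pairwise sizes N K (jn:Int) hK (by positivity) hlen)
    have hDS : pvDolls sizes N K = pvS sizes N := by
      apply List.ext_getElem (by rw [hDlen, hSlen])
      intro i hi1 hi2
      have hiN : i < N := by rwa [hDlen] at hi1
      have hjnK : i % K < K := Nat.mod_lt _ hK
      have hieq : i % K + K * (i / K) = i := by
        have := Nat.div_add_mod i K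
        omega
      have hsEq := hstr (i % K) hjnK
      have hlt : i / K < (PySem.List.pyRange ((i % K : Nat):Int) (N:Int) (K:Int)).length :=
        (stride_len_iff N K (i % K) (i / K) hK).mpr (by omega)
      have hval1 : ((PySem.List.pyRange ((i % K : Nat):Int) (N:Int) (K:Int)).map (pvF sizes N K)).getD (i / K) 0
          = pvF sizes N K (i:Int) := by
        rw [List.getD_eq_getElem _ 0 (by simpa using hlt), List.getElem_map,
          stride_getElem N K _ _ hK hlt]
        congr 1
        exact_mod_cast congrArg (fun m : Nat => (m : Int)) hieq
      have hval2 : (pvStrS sizes N K ((i % K : Nat):Int)).getD (i / K) 0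
          = PySem.List.pyGetD (pvS sizes N) (i:Int) 0 := by
        unfold pvStrS
        rw [List.getD_eq_getElem _ 0 (by simpa using hlt), List.getElem_map,
          stride_getElem N K _ _ hK hlt]
        congr 1
        exact_mod_cast congrArg (fun m : Nat => (m : Int)) hieq
      have hgd := congrArg (fun l => l.getD (i / K) 0) hsEq
      dsimp only at hgd
      rw [hval1, hval2] at hgd
      have hD : (pvDolls sizes N K)[i] = pvF sizes N K (i:Int) := by
        simp [pvDolls, PySem.List.getElem_pyRange_one]
      rw [hD, hgd, PySem.List.pyGetD_eq_getElem _ 0 (by positivity) (by rw [hSlen]; exact_mod_cast hiN)]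
      simp
    rw [hDS]
    unfold pvS
    rw [PySem.List.sorted_rev_sorted_rev]

-- ===== VERDICT (by name: the statement is the Claim_ definition above) =====
theorem scarecrow_sort_spec : Claim_equal_scarecrow_sort := by
  intro n k sizes _ hpre
  unfold Spec_scarecrow_sort scarecrow_sort scarecrow_sort_alt
  by_cases hn : n ≤ 0
  · rw [if_pos hn, PySem.List.pyRange_one_eq_nil hn]
    simp [PySem.List.sorted_eq_nil_iff]
  · rw [not_le] at hn
    obtain ⟨hk, hlen⟩ := hpre hn
    rw [if_neg (by omega)]
    obtain ⟨N, rfl⟩ : ∃ N : Nat, n = (N:Int) := ⟨n.toNat, (Int.toNat_of_nonneg (le_of_lt hn)).symm⟩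
    obtain ⟨K, rfl⟩ : ∃ K : Nat, k = (K:Int) := ⟨k.toNat, (Int.toNat_of_nonneg (le_of_lt hk)).symm⟩
    have hK0 : 0 < K := by exact_mod_cast hk
    have hlen' : N ≤ sizes.length := by exact_mod_cast hlen
    dsimp only
    rw [bucket sizes K N hK0, List.map_map]
    simp only [Function.comp_def]
    rw [PySem.List.slice_to_natCast]
    show (decide (pvDolls sizes N K = PySem.List.sorted (pvDolls sizes N K) (fun x => x) true))
        = (PySem.List.pyRange 0 (K:Int) 1).all (fun j =>
            !( ((PySem.List.pyRange j (N:Int) (K:Int)).foldl (fun d i =>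
                (d.modify (PySem.List.pyGetD sizes i 0) 0 (· + 1)).modify
                  (PySem.List.pyGetD (pvS sizes N) i 0) 0 (· - 1))
                (PySem.Dict.empty : PySem.Dict Int Int)).values.any (fun v => v != 0)))
    have hAll : ∀ j ∈ PySem.List.pyRange 0 (K:Int) 1,
        ((!( ((PySem.List.pyRange j (N:Int) (K:Int)).foldl (fun d i =>
            (d.modify (PySem.List.pyGetD sizes i 0) 0 (· + 1)).modify
              (PySem.List.pyGetD (pvS sizes N) i 0) 0 (· - 1))
            (PySem.Dict.empty : PySem.Dict Int Int)).values.any (fun v => v != 0))) = true)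
          ↔ (pvU sizes N K j).Perm (pvStrS sizes N K j) := by
      intro j _
      exact body_iff (fun i => PySem.List.pyGetD sizes i 0)
        (fun i => PySem.List.pyGetD (pvS sizes N) i 0) (PySem.List.pyRange j (N:Int) (K:Int))
    have hmain := main_iff sizes N K hK0 hlen'
    have hall : (((PySem.List.pyRange 0 (K:Int) 1).all (fun j =>
        !( ((PySem.List.pyRange j (N:Int) (K:Int)).foldl (fun d i =>
            (d.modify (PySem.List.pyGetD sizes i 0) 0 (· + 1)).modify
              (PySem.List.pyGetD (pvS sizes N) i 0) 0 (· - 1))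
            (PySem.Dict.empty : PySem.Dict Int Int)).values.any (fun v => v != 0)))) = true)
        ↔ (pvDolls sizes N K = PySem.List.sorted (pvDolls sizes N K) (fun x => x) true) := by
      rw [List.all_eq_true]
      constructor
      · intro hx
        exact hmain.mpr (fun j hj => (hAll j hj).mp (hx j hj))
      · intro hx j hj
        exact (hAll j hj).mpr (hmain.mp hx j hj)
    rw [Bool.eq_iff_iff]
    simp only [decide_eq_true_eq]
    exact hall.symm
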